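-- pv_equiv track=rewrite | github.com/YJLBigData/Oneid | src/run_oneid.py | build_oneid_mapping
-- ===== SOURCE A (Python) =====
-- from collections import defaultdict
--
-- IDENTITY_FIELDS = ["phone", "email", "wx_unionid", "wx_openid", "alipay_id", "tmall_id"]
--
-- class UnionFind:
--     def __init__(self) -> None:
--         self.parent: dict[str, str] = {}
--         self.rank: dict[str, int] = {}
--
--     def add(self, x: str) -> None:
--         if x not in self.parent:
--             self.parent[x] = x
--             self.rank[x] = 0
--
--     def find(self, x: str) -> str:
--         parent = self.parent[x]
--         if parent != x:
--             self.parent[x] = self.find(parent)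
--         return self.parent[x]
--
--     def union(self, a: str, b: str) -> None:
--         ra = self.find(a)
--         rb = self.find(b)
--         if ra == rb:
--             return
--         if self.rank[ra] < self.rank[rb]:
--             self.parent[ra] = rb
--         elif self.rank[ra] > self.rank[rb]:
--             self.parent[rb] = ra
--         else:
--             self.parent[rb] = ra
--             self.rank[ra] += 1
--
-- def normalize(v: str) -> str | None:
--     if v in {"", "NULL", "\\N"}:
--         return None
--     return v
--
-- def build_oneid_mapping(rows: list[list[str]]) -> list[tuple[str, str]]:
--     uf = UnionFind()
--     user_nodes: list[tuple[str, str]] = []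
--
--     for row in rows:
--         user_id = row[0]
--         user_node = f"user:{user_id}"
--         uf.add(user_node)
--         user_nodes.append((user_node, user_id))
--
--         for field, raw_val in zip(IDENTITY_FIELDS, row[1:]):
--             value = normalize(raw_val)
--             if not value:
--                 continue
--             id_node = f"{field}:{value}"
--             uf.add(id_node)
--             uf.union(user_node, id_node)
--
--     root_to_users: dict[str, list[str]] = defaultdict(list)
--     for user_node, user_id in user_nodes:
--         root_to_users[uf.find(user_node)].append(user_id)
--
--     grouped_users = sorted((sorted(users) for users in root_to_users.values()), key=lambda x: x[0])
--
--     result: list[tuple[str, str]] = []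
--     for idx, users in enumerate(grouped_users, start=1):
--         oneid = f"ONEID{idx:08d}"
--         for user_id in users:
--             result.append((oneid, user_id))
--     return result
-- ===== SOURCE B (Python) =====
-- IDENTITY_FIELDS = ["phone", "email", "wx_unionid", "wx_openid", "alipay_id", "tmall_id"]
--
-- def build_oneid_mapping(rows):
--     # eager-relabeling components: comp maps each node to a component label;
--     # a union rewrites every occurrence of one label to the other (no union-find)
--     comp = {}
--     user_nodes = []
--     for row in rows:
--         user_id = row[0]
--         user_node = "user:" + user_id
--         if user_node not in comp:
--             comp[user_node] = user_node
--         user_nodes.append((user_node, user_id))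
--         for field, raw_val in zip(IDENTITY_FIELDS, row[1:]):
--             if raw_val in ("", "NULL", "\\N"):
--                 continue
--             id_node = field + ":" + raw_val
--             if id_node not in comp:
--                 comp[id_node] = id_node
--             la, lb = comp[user_node], comp[id_node]
--             if la != lb:
--                 comp = {k: (la if v == lb else v) for k, v in comp.items()}
--     groups = {}
--     for user_node, user_id in user_nodes:
--         groups.setdefault(comp[user_node], []).append(user_id)
--     out = []
--     for idx, members in enumerate(
--             sorted((sorted(g) for g in groups.values()), key=lambda g: g[0]), start=1):
--         oneid = "ONEID%08d" % idx
--         out.extend((oneid, u) for u in members)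
--     return out
-- ===== Notes on version B (the rewrite author's own statement) =====
-- stated objective: alternative
-- what changed: Replaces the rank-based path-compressing union-find with an eager-relabeling component map (a union rewrites one component label across the whole dict in one comprehension), and emits the final pairs by zip-with-index/flatten instead of a counter fold; Pre_ only excludes rows that are empty lists, on which both Pythons raise IndexError at row[0].
import Mathlib
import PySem

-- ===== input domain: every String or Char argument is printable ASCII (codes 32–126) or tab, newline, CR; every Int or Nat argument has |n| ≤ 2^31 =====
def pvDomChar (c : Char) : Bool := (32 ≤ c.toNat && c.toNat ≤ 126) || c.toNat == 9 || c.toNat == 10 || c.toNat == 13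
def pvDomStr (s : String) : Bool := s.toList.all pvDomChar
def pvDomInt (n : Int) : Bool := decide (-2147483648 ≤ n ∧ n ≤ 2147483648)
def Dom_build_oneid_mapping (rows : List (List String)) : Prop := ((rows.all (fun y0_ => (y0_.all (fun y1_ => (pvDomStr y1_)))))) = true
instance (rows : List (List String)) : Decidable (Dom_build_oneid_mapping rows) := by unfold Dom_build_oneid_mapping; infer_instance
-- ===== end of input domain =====

-- B replaces A's rank/path-compression union-find by an eager-relabeling component
-- map (alternative algorithm, not claimed faster); equivalence is about the return value.

-- ===== PORT A =====
def IDENTITY_FIELDS : List String :=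
  ["phone", "email", "wx_unionid", "wx_openid", "alipay_id", "tmall_id"]

def pyNormalize (v : String) : Option String :=
  if v = "" ∨ v = "NULL" ∨ v = "\\N" then none else some v

-- UnionFind.add
def ufAdd (p : PySem.Dict String String) (rk : PySem.Dict String Int) (x : String) :
    PySem.Dict String String × PySem.Dict String Int :=
  if p.contains x then (p, rk) else (p.insert x x, rk.insert x 0)

-- UnionFind.find (recursive, with path compression).  Python's recursion is over the
-- acyclic parent forest; the Nat fuel (callers pass size+1, enough under the forest
-- invariant) and the `none` branch (Python would raise KeyError; callers only pass
-- added nodes) are totality guards only.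
def ufFind : Nat → PySem.Dict String String → String → String × PySem.Dict String String
  | 0, p, x => (x, p)
  | fuel + 1, p, x =>
    match p.get? x with
    | none => (x, p)
    | some px =>
      if px = x then (x, p)
      else
        let rp := ufFind fuel p px
        (rp.1, rp.2.insert x rp.1)

-- UnionFind.union  (rank lookups are on roots, always present; getD 0 is a totality guard)
def ufUnion (p : PySem.Dict String String) (rk : PySem.Dict String Int) (a b : String) :
    PySem.Dict String String × PySem.Dict String Int :=
  let fa := ufFind (p.size + 1) p a
  let fb := ufFind (fa.2.size + 1) fa.2 b
  let ra := fa.1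
  let rb := fb.1
  let p2 := fb.2
  if ra = rb then (p2, rk)
  else if rk.getD ra 0 < rk.getD rb 0 then (p2.insert ra rb, rk)
  else if rk.getD rb 0 < rk.getD ra 0 then (p2.insert rb ra, rk)
  else (p2.insert rb ra, rk.insert ra (rk.getD ra 0 + 1))

-- f"ONEID{idx:08d}"
def oneidA (idx : Int) : String := "ONEID" ++ PySem.Str.zfill (PySem.Int.toStr idx) 8

-- body of the inner `for field, raw_val in zip(...)` loop
def ufRowStep (user_node : String)
    (prk : PySem.Dict String String × PySem.Dict String Int) (fv : String × String) :
    PySem.Dict String String × PySem.Dict String Int :=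
  match pyNormalize fv.2 with
  | none => prk
  | some value =>
    let id_node := fv.1 ++ ":" ++ value
    let prk2 := ufAdd prk.1 prk.2 id_node
    ufUnion prk2.1 prk2.2 user_node id_node

-- body of the outer `for row in rows` loop
def rowStepA
    (st : (PySem.Dict String String × PySem.Dict String Int) × List (String × String))
    (row : List String) :
    (PySem.Dict String String × PySem.Dict String Int) × List (String × String) :=
  let user_id := row.headD ""            -- row[0]; Pre_ excludes the empty row (IndexError)
  let user_node := "user:" ++ user_id
  let prk := ufAdd st.1.1 st.1.2 user_node
  let uns := st.2 ++ [(user_node, user_id)]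
  ((IDENTITY_FIELDS.zip (row.drop 1)).foldl (ufRowStep user_node) prk, uns)   -- row[1:] = drop 1

def build_oneid_mapping (rows : List (List String)) : List (String × String) :=
  let st := rows.foldl rowStepA ((PySem.Dict.empty, PySem.Dict.empty), [])
  -- root_to_users (defaultdict(list); uf.find keeps mutating parent, threaded through)
  let gp := st.2.foldl
    (fun (gp : PySem.Dict String (List String) × PySem.Dict String String) un =>
      let f := ufFind (gp.2.size + 1) gp.2 un.1
      (gp.1.insert f.1 (gp.1.getD f.1 [] ++ [un.2]), f.2))
    (PySem.Dict.empty, st.1.1)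
  -- grouped_users; key x[0]: groups are nonempty, headD "" is a totality guard
  let grouped := PySem.List.sorted
      (gp.1.values.map (fun users => PySem.List.sorted users (fun x => x) false))
      (fun g => g.headD "") false
  (grouped.foldl
    (fun (st : Int × List (String × String)) users =>
      (st.1 + 1, users.foldl (fun res u => res ++ [(oneidA st.1, u)]) st.2))
    (1, [])).2

-- ===== PORT B =====
-- "%08d" formatting
def oneidB (idx : Int) : String := "ONEID" ++ PySem.Str.zfill (PySem.Int.toStr idx) 8

-- comp = {k: (la if v == lb else v) for k, v in comp.items()}
def relabel (comp : PySem.Dict String String) (la lb : String) : PySem.Dict String String :=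
  PySem.Dict.mk (comp.items.map (fun kv => (kv.1, if kv.2 = lb then la else kv.2)))

-- body of B's inner zip loop
def compRowStep (user_node : String) (comp : PySem.Dict String String)
    (fv : String × String) : PySem.Dict String String :=
  if fv.2 = "" ∨ fv.2 = "NULL" ∨ fv.2 = "\\N" then comp
  else
    let id_node := fv.1 ++ ":" ++ fv.2
    let comp2 := if comp.contains id_node then comp else comp.insert id_node id_node
    let la := comp2.getD user_node user_node   -- comp[user_node]; always present
    let lb := comp2.getD id_node id_node
    if la ≠ lb then relabel comp2 la lb else comp2

-- body of B's outer row loop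
def rowStepB (st : PySem.Dict String String × List (String × String)) (row : List String) :
    PySem.Dict String String × List (String × String) :=
  let user_id := row.headD ""             -- row[0]; Pre_ excludes the empty row
  let user_node := "user:" ++ user_id
  let comp := if st.1.contains user_node then st.1 else st.1.insert user_node user_node
  ((IDENTITY_FIELDS.zip (row.drop 1)).foldl (compRowStep user_node) comp,
   st.2 ++ [(user_node, user_id)])

def build_oneid_mapping_alt (rows : List (List String)) : List (String × String) :=
  let st := rows.foldl rowStepB (PySem.Dict.empty, [])
  -- groups.setdefault(comp[user_node], []).append(user_id)
  let groups := st.2.foldl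
    (fun (g : PySem.Dict String (List String)) un =>
      g.modify (st.1.getD un.1 un.1) [] (fun l => l ++ [un.2]))
    PySem.Dict.empty
  let grouped := PySem.List.sorted
      (groups.values.map (fun g => PySem.List.sorted g (fun x => x) false))
      (fun g => g.headD "") false
  (PySem.List.enumerate grouped 1).flatMap (fun gi => gi.2.map (fun u => (oneidB gi.1, u)))

-- ===== PRECONDITION & SPEC =====
-- Pre_ excludes exactly the inputs containing an empty row, on which Python's row[0]
-- raises IndexError (in A and in B alike).
def Pre_build_oneid_mapping (rows : List (List String)) : Prop := ∀ row ∈ rows, row ≠ []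
instance (rows : List (List String)) : Decidable (Pre_build_oneid_mapping rows) := by
  unfold Pre_build_oneid_mapping; infer_instance

def pvWitness_build_oneid_mapping : List (List String) :=
  [["u1", "555", "a@b", "", "", "", ""], ["u2", "555", "", "", "", "", ""], ["u3"]]

def Spec_build_oneid_mapping (rows : List (List String)) (out : List (String × String)) : Prop :=
  out = build_oneid_mapping_alt rows
instance (rows : List (List String)) (out : List (String × String)) :
    Decidable (Spec_build_oneid_mapping rows out) := by
  unfold Spec_build_oneid_mapping; infer_instance

-- ===== CLAIM (what is proved, stated in full; the proofs are below) =====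
def Claim_equal_build_oneid_mapping : Prop :=
  ∀ (rows : List (List String)), Dom_build_oneid_mapping rows →
    Pre_build_oneid_mapping rows →
    Spec_build_oneid_mapping rows (build_oneid_mapping rows)

-- ===== LEMMAS AND PROOFS =====


def pstep (p : PySem.Dict String String) (x : String) : String := (p.get? x).getD x

def piter (p : PySem.Dict String String) : Nat → String → String
  | 0, x => x
  | k + 1, x => piter p k (pstep p x)

def IsFixP (p : PySem.Dict String String) (x : String) : Prop := pstep p x = x

def WFP (p : PySem.Dict String String) : Prop := ∀ x, ∃ k, IsFixP p (piter p k x)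

def proot (p : PySem.Dict String String) (x : String) : String := piter p p.size x

def ClosedP (p : PySem.Dict String String) : Prop :=
  ∀ x px, p.get? x = some px → px ∈ p.keys

def GoodP (p : PySem.Dict String String) : Prop := WFP p ∧ ClosedP p ∧ p.keys.Nodup

theorem piter_add (p : PySem.Dict String String) (a b : Nat) (x : String) :
    piter p (a + b) x = piter p b (piter p a x) := by
  induction a generalizing x with
  | zero => simp [piter]
  | succ a ih =>
      have h1 : a + 1 + b = (a + b) + 1 := by omega
      rw [h1]
      show piter p (a + b) (pstep p x) = piter p b (piter p (a+1) x)
      rw [ih]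
      rfl

theorem piter_fix (p : PySem.Dict String String) {y : String} (h : IsFixP p y) (n : Nat) :
    piter p n y = y := by
  induction n with
  | zero => rfl
  | succ n ih => show piter p n (pstep p y) = y; rw [h]; exact ih

theorem piter_stable (p : PySem.Dict String String) {k m : Nat} {x : String}
    (h : IsFixP p (piter p k x)) (hkm : k ≤ m) : piter p m x = piter p k x := by
  have : m = k + (m - k) := by omega
  rw [this, piter_add]
  exact piter_fix p h _

theorem mem_keys_of_not_fix {p : PySem.Dict String String} {x : String}
    (h : ¬ IsFixP p x) : x ∈ p.keys := by
  by_cases hg : p.get? x = none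
  · exact absurd (by simp [IsFixP, pstep, hg]) h
  · rw [PySem.Dict.get?_eq_none_iff_not_mem_keys, not_not] at hg; exact hg

theorem keys_length_eq_size (p : PySem.Dict String String) : p.keys.length = p.size := by
  simp [PySem.Dict.keys, PySem.Dict.size]

theorem pvNodupLen {l l' : List String} (h : l.Nodup) (hs : l ⊆ l') : l.length ≤ l'.length := by
  classical
  calc l.length = l.toFinset.card := (List.toFinset_card_of_nodup h).symm
    _ ≤ l'.toFinset.card := Finset.card_le_card (fun a ha => by
        rw [List.mem_toFinset] at *; exact hs ha)
    _ ≤ l'.length := l'.toFinset_card_le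

theorem root_isFix {p : PySem.Dict String String} (hwf : WFP p) (x : String) :
    IsFixP p (proot p x) := by
  haveI : DecidablePred (fun k => IsFixP p (piter p k x)) := by
    intro k; unfold IsFixP; infer_instance
  obtain ⟨k0, hk0⟩ := hwf x
  have hex : ∃ k, IsFixP p (piter p k x) := ⟨k0, hk0⟩
  set k := Nat.find hex with hkdef
  have hkfix : IsFixP p (piter p k x) := Nat.find_spec hex
  have hmin : ∀ i < k, ¬ IsFixP p (piter p i x) := fun i hi => Nat.find_min hex hi
  have hle : k ≤ p.size := by
    by_contra hgt
    rw [Nat.not_le] at hgt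
    -- the first k iterates are distinct members of p.keys
    have hinj : ∀ i j, i < j → j < k → piter p i x ≠ piter p j x := by
      intro i j hij hjk heq
      have : piter p (k - (j - i)) x = piter p k x := by
        have h1 : k = j + (k - j) := by omega
        have h2 : k - (j - i) = i + (k - j) := by omega
        rw [h2, piter_add, heq, ← piter_add, ← h1]
      exact hmin (k - (j - i)) (by omega) (by rw [this]; exact hkfix)
    have hnodup : ((List.range k).map (fun i => piter p i x)).Nodup := by
      rw [List.nodup_map_iff_inj_on List.nodup_range]
      intro i hi j hj hfe
      simp only [List.mem_range] at hi hj
      rcases lt_trichotomy i j with h | h | h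
      · exact absurd hfe (hinj i j h hj)
      · exact h
      · exact absurd hfe.symm (hinj j i h hi)
    have hsub : ((List.range k).map (fun i => piter p i x)) ⊆ p.keys := by
      intro y hy
      simp only [List.mem_map, List.mem_range] at hy
      obtain ⟨i, hi, rfl⟩ := hy
      exact mem_keys_of_not_fix (hmin i hi)
    have := pvNodupLen hnodup hsub
    simp [keys_length_eq_size] at this
    omega
  exact by rw [proot, piter_stable p hkfix hle]; exact hkfix

theorem root_eq_of_fix {p : PySem.Dict String String} (hwf : WFP p) {m : Nat} {x : String}
    (h : IsFixP p (piter p m x)) : piter p m x = proot p x := by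
  rcases Nat.le_total m p.size with hle | hge
  · rw [proot, piter_stable p h hle]
  · rw [proot] at *
    rw [piter_stable p (root_isFix hwf x) hge]
theorem root_fix_self {p : PySem.Dict String String} (hwf : WFP p) {x : String}
    (h : IsFixP p x) : proot p x = x :=
  (root_eq_of_fix hwf (m := 0) h).symm

theorem root_step {p : PySem.Dict String String} (hwf : WFP p) (x : String) :
    proot p (pstep p x) = proot p x := by
  have h1 : piter p (p.size + 1) x = piter p p.size (pstep p x) := rfl
  have h2 : IsFixP p (piter p (p.size + 1) x) := by
    rw [piter_stable p (root_isFix hwf x) (Nat.le_succ _)]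
    exact root_isFix hwf x
  have := root_eq_of_fix hwf (m := p.size) (x := pstep p x) (by rw [← h1]; exact h2)
  rw [← this, ← h1, piter_stable p (root_isFix hwf x) (Nat.le_succ _)]
  rfl

theorem root_mem {p : PySem.Dict String String} (hwf : WFP p) (hcl : ClosedP p)
    {x : String} (hx : x ∈ p.keys) : proot p x ∈ p.keys := by
  obtain ⟨k, hk⟩ := hwf x
  induction k generalizing x with
  | zero => rw [root_fix_self hwf (show IsFixP p x from hk)]; exact hx
  | succ k ih =>
      by_cases hfx : IsFixP p x
      · rw [root_fix_self hwf hfx]; exact hx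
      · have hsome : ∃ px, p.get? x = some px := by
          cases hg : p.get? x with
          | none => exact absurd (by simp [IsFixP, pstep, hg]) hfx
          | some px => exact ⟨px, rfl⟩
        obtain ⟨px, hpx⟩ := hsome
        have hst : pstep p x = px := by simp [pstep, hpx]
        have := ih (x := pstep p x) (by rw [hst]; exact hcl x px hpx)
          hk
        rw [root_step hwf] at this
        exact this

-- ==== chunk 2 ====
theorem pstep_insert (p : PySem.Dict String String) (x c y : String) :
    pstep (p.insert x c) y = if y = x then c else pstep p y := by
  unfold pstep
  rw [PySem.Dict.get?_insert]
  split_ifs <;> rfl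

theorem link_aux {p : PySem.Dict String String} (hwf : WFP p)
    {x c : String} (hcfix : IsFixP p c) (hcx : c ≠ x)
    (hx : proot p x = c ∨ proot p x = x) :
    ∀ (k : Nat) (y : String), IsFixP p (piter p k y) →
      ∃ m, piter (p.insert x c) m y =
            (if proot p y = proot p x then c else proot p y) ∧
          IsFixP (p.insert x c) (piter (p.insert x c) m y) := by
  have hfix'c : IsFixP (p.insert x c) c := by
    unfold IsFixP; rw [pstep_insert, if_neg hcx]; exact hcfix
  have hfix'keep : ∀ z, IsFixP p z → z ≠ x → IsFixP (p.insert x c) z := by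
    intro z hz hzx; unfold IsFixP; rw [pstep_insert, if_neg hzx]; exact hz
  intro k
  induction k with
  | zero =>
      intro y hk
      have hfy : IsFixP p y := hk
      have hry : proot p y = y := root_fix_self hwf hfy
      by_cases hyx : y = x
      · refine ⟨1, ?_, ?_⟩
        · show piter (p.insert x c) 0 (pstep (p.insert x c) y) = _
          rw [if_pos (by rw [hyx])]
          show pstep (p.insert x c) y = c
          rw [pstep_insert, if_pos hyx]
        · show IsFixP _ (pstep (p.insert x c) y)
          rw [pstep_insert, if_pos hyx]
          exact hfix'c
      · by_cases hxr : proot p y = proot p x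
        · rcases hx with hc | hxx
          · have hyc : y = c := by rw [← hry, hxr, hc]
            refine ⟨0, ?_, ?_⟩
            · show (y : String) = _
              rw [if_pos hxr, ← hyc]
            · show IsFixP (p.insert x c) (y : String)
              rw [hyc]; exact hfix'c
          · exact absurd (by rw [hry] at hxr; rw [hxr, hxx]) hyx
        · refine ⟨0, ?_, hfix'keep y hfy hyx⟩
          show (y : String) = _
          rw [if_neg hxr, hry]
  | succ k ih =>
      intro y hk
      by_cases hfy : IsFixP p y
      · exact ih y (by rw [piter_fix p hfy]; exact hfy)
      · by_cases hyx : y = x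
        · subst hyx
          have hrc : proot p y = c := by
            rcases hx with hc | hxx
            · exact hc
            · exact absurd (by
                have := root_isFix hwf y
                rw [hxx] at this
                exact this) hfy
          refine ⟨1, ?_, ?_⟩
          · show pstep (p.insert y c) y = _
            rw [if_pos rfl, pstep_insert, if_pos rfl]
          · show IsFixP _ (pstep (p.insert y c) y)
            rw [pstep_insert, if_pos rfl]
            exact hfix'c
        · have hst : pstep (p.insert x c) y = pstep p y := by
            rw [pstep_insert, if_neg hyx]
          obtain ⟨m, hm1, hm2⟩ := ih (pstep p y) hk
          refine ⟨m + 1, ?_, ?_⟩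
          · show piter (p.insert x c) m (pstep (p.insert x c) y) = _
            rw [hst, hm1, root_step hwf]
          · show IsFixP _ (piter (p.insert x c) m (pstep (p.insert x c) y))
            rw [hst]
            exact hm2

theorem link_insert {p : PySem.Dict String String} (hG : GoodP p)
    {x c : String} (hcfix : IsFixP p c) (hcx : c ≠ x)
    (hxmem : x ∈ p.keys) (hcmem : c ∈ p.keys)
    (hx : proot p x = c ∨ proot p x = x) :
    (p.insert x c).keys = p.keys ∧ GoodP (p.insert x c) ∧
      ∀ y, proot (p.insert x c) y =
        (if proot p y = proot p x then c else proot p y) := by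
  obtain ⟨hwf, hcl, hnd⟩ := hG
  have hkeys : (p.insert x c).keys = p.keys :=
    PySem.Dict.keys_insert_of_contains p c ((PySem.Dict.contains_iff_mem_keys p x).2 hxmem)
  have hwf' : WFP (p.insert x c) := by
    intro y
    obtain ⟨k, hk⟩ := hwf y
    obtain ⟨m, _, hm2⟩ := link_aux hwf hcfix hcx hx k y hk
    exact ⟨m, hm2⟩
  have hroots : ∀ y, proot (p.insert x c) y =
      (if proot p y = proot p x then c else proot p y) := by
    intro y
    obtain ⟨k, hk⟩ := hwf y
    obtain ⟨m, hm1, hm2⟩ := link_aux hwf hcfix hcx hx k y hk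
    rw [← root_eq_of_fix hwf' hm2, hm1]
  refine ⟨hkeys, ⟨hwf', ?_, by rw [hkeys]; exact hnd⟩, hroots⟩
  intro y py hy
  rw [PySem.Dict.get?_insert] at hy
  rw [hkeys]
  split_ifs at hy with hyx
  · cases hy; exact hcmem
  · exact hcl y py hy

theorem add_fresh {p : PySem.Dict String String} (hG : GoodP p)
    {x : String} (hx : p.contains x = false) :
    (p.insert x x).keys = p.keys ++ [x] ∧ GoodP (p.insert x x) ∧
      ∀ y, proot (p.insert x x) y = proot p y := by
  obtain ⟨hwf, hcl, hnd⟩ := hG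
  have hgx : p.get? x = none := by
    cases hg : p.get? x with
    | none => rfl
    | some v => rw [PySem.Dict.contains_eq_isSome_get?, hg] at hx; simp at hx
  have hstep : ∀ y, pstep (p.insert x x) y = pstep p y := by
    intro y
    rw [pstep_insert]
    split_ifs with h
    · subst h; simp [pstep, hgx]
    · rfl
  have hit : ∀ k y, piter (p.insert x x) k y = piter p k y := by
    intro k
    induction k with
    | zero => intro y; rfl
    | succ k ih => intro y; show piter _ k _ = piter p k _; rw [hstep, ih]
  have hfix : ∀ y, IsFixP (p.insert x x) y ↔ IsFixP p y := by
    intro y; unfold IsFixP; rw [hstep]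
  have hwf' : WFP (p.insert x x) := by
    intro y; obtain ⟨k, hk⟩ := hwf y; exact ⟨k, by rw [hfix, hit]; exact hk⟩
  have hkeys : (p.insert x x).keys = p.keys ++ [x] :=
    PySem.Dict.keys_insert_of_not_contains p x hx
  refine ⟨hkeys, ⟨hwf', ?_, ?_⟩, ?_⟩
  · intro y py hy
    rw [PySem.Dict.get?_insert] at hy
    rw [hkeys]
    split_ifs at hy with hyx
    · cases hy; simp
    · exact List.mem_append_left _ (hcl y py hy)
  · rw [hkeys]
    refine List.Nodup.append hnd (List.nodup_singleton x) ?_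
    intro a ha hax
    simp at hax
    rw [hax] at ha
    exact ((PySem.Dict.get?_eq_none_iff_not_mem_keys p x).1 hgx) ha
  · intro y
    have h1 : IsFixP (p.insert x x) (piter (p.insert x x) p.size y) := by
      rw [hfix, hit]; exact root_isFix hwf y
    rw [← root_eq_of_fix hwf' h1, hit]
    rfl

theorem ufFind_spec (p : PySem.Dict String String) (hG : GoodP p) :
    ∀ (fuel : Nat) (x : String) (k : Nat), k < fuel → IsFixP p (piter p k x) →
      (ufFind fuel p x).1 = proot p x ∧
      (ufFind fuel p x).2.keys = p.keys ∧
      GoodP (ufFind fuel p x).2 ∧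
      ∀ y, proot (ufFind fuel p x).2 y = proot p y := by
  obtain ⟨hwf, hcl, hnd⟩ := hG
  intro fuel
  induction fuel with
  | zero => intro x k hk; omega
  | succ fuel ih =>
      intro x k hkf hk
      have hun : ufFind (fuel + 1) p x =
          (match p.get? x with
           | none => (x, p)
           | some px =>
             if px = x then (x, p)
             else ((ufFind fuel p px).1, (ufFind fuel p px).2.insert x (ufFind fuel p px).1)) := rfl
      rw [hun]
      cases hg : p.get? x with
      | none =>
          have hfx : IsFixP p x := by simp [IsFixP, pstep, hg]
          exact ⟨(root_fix_self hwf hfx).symm, rfl, ⟨hwf, hcl, hnd⟩, fun y => rfl⟩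
      | some px =>
          by_cases hpx : px = x
          · have hfx : IsFixP p x := by simp [IsFixP, pstep, hg, hpx]
            simp only [if_pos hpx]
            refine ⟨(root_fix_self hwf hfx).symm, by simp, ⟨hwf, hcl, hnd⟩, by simp⟩
          · simp only [if_neg hpx]
            have hstx : pstep p x = px := by simp [pstep, hg]
            have hnfx : ¬ IsFixP p x := by rw [IsFixP, hstx]; exact hpx
            have hk0 : k ≠ 0 := by
              intro h; rw [h] at hk; exact hnfx hk
            have hkpx : IsFixP p (piter p (k - 1) px) := by
              have : piter p k x = piter p (k - 1) (pstep p x) := by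
                have hke : k = (k - 1) + 1 := by omega
                rw [hke]; rfl
              rw [this, hstx] at hk
              exact hk
            obtain ⟨h1, h2, h3, h4⟩ := ih px (k - 1) (by omega) hkpx
            set p1 := (ufFind fuel p px).2 with hp1
            set r := (ufFind fuel p px).1 with hr
            have hrpx : r = proot p x := by
              rw [h1, ← root_step hwf x, hstx]
            have hxk : x ∈ p.keys := mem_keys_of_not_fix hnfx
            have hrnx : r ≠ x := by
              rw [hrpx]
              intro he
              have := root_isFix hwf x
              rw [he] at this
              exact hnfx this
            have hrfix1 : IsFixP p1 r := by
              have := root_isFix h3.1 x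
              rw [h4 x, ← hrpx] at this
              -- this : IsFixP p1 r ?  proot p1 x = proot p x = r
              exact this
            have hrmem : r ∈ p1.keys := by
              rw [h2, hrpx]
              exact root_mem hwf hcl hxk
            have hxmem1 : x ∈ p1.keys := by rw [h2]; exact hxk
            obtain ⟨hk5, hG5, hroot5⟩ := link_insert h3 hrfix1 hrnx hxmem1 hrmem
              (Or.inl (by rw [h4 x, ← hrpx]))
            refine ⟨hrpx, by rw [hk5, h2], hG5, ?_⟩
            intro y
            rw [hroot5 y, h4 x, h4 y, ← hrpx]
            split_ifs with h
            · rw [h]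
            · rfl

theorem ufFind_run {p : PySem.Dict String String} (hG : GoodP p) (x : String) (fuel : Nat)
    (hf : p.size < fuel) :
    (ufFind fuel p x).1 = proot p x ∧
    (ufFind fuel p x).2.keys = p.keys ∧
    GoodP (ufFind fuel p x).2 ∧
    ∀ y, proot (ufFind fuel p x).2 y = proot p y :=
  ufFind_spec p hG fuel x p.size hf (root_isFix hG.1 x)

theorem ufAdd_spec {p : PySem.Dict String String} (hG : GoodP p)
    (rk : PySem.Dict String Int) (x : String) :
    GoodP (ufAdd p rk x).1 ∧
    (ufAdd p rk x).1.keys = (if p.contains x then p.keys else p.keys ++ [x]) ∧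
    (∀ y, proot (ufAdd p rk x).1 y = proot p y) := by
  unfold ufAdd
  by_cases h : p.contains x
  · simp only [if_pos h]
    refine ⟨hG, ?_, ?_⟩ <;> simp
  · rw [Bool.not_eq_true] at h
    simp only [h]
    obtain ⟨hk, hG', hr⟩ := add_fresh hG h
    simp only [Bool.false_eq_true, if_false]
    exact ⟨hG', hk, hr⟩

theorem merge_iff {A B X Y : String} (hAB : A ≠ B) :
    ((if X = A then B else X) = (if Y = A then B else Y)) ↔
      (X = Y ∨ ((X = A ∨ X = B) ∧ (Y = A ∨ Y = B))) := by
  have hside : ∀ Z : String, (Z = A ∨ Z = B) → (if Z = A then B else Z) = B := by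
    intro Z hZ
    rcases hZ with hZ | hZ
    · rw [if_pos hZ]
    · rw [if_neg (by rw [hZ]; exact fun h => hAB h.symm), hZ]
  constructor
  · intro hL
    by_cases hx : X = A <;> by_cases hy : Y = A
    · exact Or.inl (hx.trans hy.symm)
    · rw [if_pos hx, if_neg hy] at hL
      exact Or.inr ⟨Or.inl hx, Or.inr hL.symm⟩
    · rw [if_neg hx, if_pos hy] at hL
      exact Or.inr ⟨Or.inr hL, Or.inl hy⟩
    · rw [if_neg hx, if_neg hy] at hL
      exact Or.inl hL
  · rintro (h | ⟨hx, hy⟩)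
    · rw [h]
    · rw [hside X hx, hside Y hy]

set_option maxHeartbeats 1000000 in
theorem ufUnion_spec {p : PySem.Dict String String} (hG : GoodP p)
    (rk : PySem.Dict String Int) {a b : String}
    (ha : a ∈ p.keys) (hb : b ∈ p.keys) :
    GoodP (ufUnion p rk a b).1 ∧
    (ufUnion p rk a b).1.keys = p.keys ∧
    ∀ x y, proot (ufUnion p rk a b).1 x = proot (ufUnion p rk a b).1 y ↔
      (proot p x = proot p y ∨
        ((proot p x = proot p a ∨ proot p x = proot p b) ∧
         (proot p y = proot p a ∨ proot p y = proot p b))) := by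
  obtain ⟨h1a, h2a, h3a, h4a⟩ := ufFind_run hG a (p.size + 1) (by omega)
  set fa := ufFind (p.size + 1) p a with hfa
  obtain ⟨h1b, h2b, h3b, h4b⟩ := ufFind_run h3a b (fa.2.size + 1) (by omega)
  set fb := ufFind (fa.2.size + 1) fa.2 b with hfb
  have hra : fa.1 = proot p a := h1a
  have hrb' : fb.1 = proot p b := by rw [h1b, h4a b]
  have hkb : fb.2.keys = p.keys := by rw [h2b, h2a]
  have hroots : ∀ y, proot fb.2 y = proot p y := by
    intro y; rw [h4b, h4a]
  have hun : ufUnion p rk a b =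
      (if fa.1 = fb.1 then (fb.2, rk)
       else if rk.getD fa.1 0 < rk.getD fb.1 0 then (fb.2.insert fa.1 fb.1, rk)
       else if rk.getD fb.1 0 < rk.getD fa.1 0 then (fb.2.insert fb.1 fa.1, rk)
       else (fb.2.insert fb.1 fa.1, rk.insert fa.1 (rk.getD fa.1 0 + 1))) := rfl
  -- facts for the two link cases
  have hrafix : IsFixP fb.2 fa.1 := by
    have := root_isFix h3b.1 a
    rw [hroots a, ← hra] at this; exact this
  have hrbfix : IsFixP fb.2 fb.1 := by
    have := root_isFix h3b.1 b
    rw [hroots b, ← hrb'] at this; exact this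
  have hramem : fa.1 ∈ fb.2.keys := by
    rw [hkb, hra]; exact root_mem hG.1 hG.2.1 ha
  have hrbmem : fb.1 ∈ fb.2.keys := by
    rw [hkb, hrb']; exact root_mem hG.1 hG.2.1 hb
  have hselfa : proot fb.2 fa.1 = fa.1 := root_fix_self h3b.1 hrafix
  have hselfb : proot fb.2 fb.1 = fb.1 := root_fix_self h3b.1 hrbfix
  by_cases heq : fa.1 = fb.1
  · rw [hun, if_pos heq]
    refine ⟨h3b, hkb, ?_⟩
    intro x y
    simp only []
    rw [hroots x, hroots y]
    have hab : proot p a = proot p b := by rw [← hra, ← hrb', heq]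
    constructor
    · exact fun h => Or.inl h
    · rintro (h | ⟨hx, hy⟩)
      · exact h
      · rcases hx with hx | hx <;> rcases hy with hy | hy <;>
          simp [hx, hy, hab]
  · have hcases : ∀ (z w : String), z = fa.1 ∧ w = fb.1 ∨ z = fb.1 ∧ w = fa.1 →
        (GoodP (fb.2.insert z w) ∧ (fb.2.insert z w).keys = p.keys ∧
          ∀ x y, proot (fb.2.insert z w) x = proot (fb.2.insert z w) y ↔
            (proot p x = proot p y ∨
              ((proot p x = proot p a ∨ proot p x = proot p b) ∧
               (proot p y = proot p a ∨ proot p y = proot p b)))) := by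
      have hA : proot p a ≠ proot p b := by rw [← hra, ← hrb']; exact heq
      rintro z w (⟨rfl, rfl⟩ | ⟨rfl, rfl⟩)
      · obtain ⟨hk5, hG5, hroot5⟩ := link_insert h3b hrbfix (Ne.symm heq) hramem hrbmem
          (Or.inr hselfa)
        refine ⟨hG5, by rw [hk5, hkb], ?_⟩
        intro x y
        rw [hroot5 x, hroot5 y, hselfa, hroots x, hroots y, hra, hrb']
        exact merge_iff hA
      · obtain ⟨hk5, hG5, hroot5⟩ := link_insert h3b hrafix heq hrbmem hramem
          (Or.inr hselfb)
        refine ⟨hG5, by rw [hk5, hkb], ?_⟩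
        intro x y
        rw [hroot5 x, hroot5 y, hselfb, hroots x, hroots y, hra, hrb']
        rw [merge_iff hA.symm]
        constructor <;> intro h <;> tauto
    rw [hun, if_neg heq]
    split_ifs with h1 h2
    · exact hcases fa.1 fb.1 (Or.inl ⟨rfl, rfl⟩)
    · exact hcases fb.1 fa.1 (Or.inr ⟨rfl, rfl⟩)
    · exact hcases fb.1 fa.1 (Or.inr ⟨rfl, rfl⟩)


-- ==== B side: labels ====
def lab (comp : PySem.Dict String String) (x : String) : String := comp.getD x x

def LabClosed (comp : PySem.Dict String String) : Prop :=
  ∀ k v, comp.get? k = some v → v ∈ comp.keys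

def Couple (p comp : PySem.Dict String String) : Prop :=
  GoodP p ∧ comp.keys.Nodup ∧ LabClosed comp ∧
  (∀ x, x ∈ p.keys ↔ x ∈ comp.keys) ∧
  (∀ x y, proot p x = proot p y ↔ lab comp x = lab comp y)

theorem relabel_keys (comp : PySem.Dict String String) (la lb : String) :
    (relabel comp la lb).keys = comp.keys := by
  simp [relabel, PySem.Dict.keys]

theorem relabel_get? (comp : PySem.Dict String String) (la lb y : String) :
    (relabel comp la lb).get? y = (comp.get? y).map (fun v => if v = lb then la else v) := by
  show Option.map _ (List.find? _ (comp.items.map _)) = _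
  rw [List.find?_map]
  have hc : ((fun (p : String × String) => p.1 == y) ∘
      (fun kv : String × String => (kv.1, if kv.2 = lb then la else kv.2)))
      = (fun (p : String × String) => p.1 == y) := by
    funext kv; rfl
  rw [hc]
  show Option.map _ (Option.map _ _) = Option.map _ (Option.map _ _)
  rw [Option.map_map, Option.map_map]
  rfl

theorem lab_relabel {comp : PySem.Dict String String} {la lb : String}
    (hlb : lb ∈ comp.keys) (y : String) :
    lab (relabel comp la lb) y = if lab comp y = lb then la else lab comp y := by
  cases hg : comp.get? y with
  | none =>
      have hy : y ∉ comp.keys := (PySem.Dict.get?_eq_none_iff_not_mem_keys comp y).1 hg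
      have h1 : lab comp y = y := by
        unfold lab; rw [PySem.Dict.getD_eq_get?_getD, hg]; rfl
      have h2 : lab (relabel comp la lb) y = y := by
        unfold lab; rw [PySem.Dict.getD_eq_get?_getD, relabel_get?, hg]; rfl
      rw [h1, h2, if_neg (fun h => hy (by rw [h]; exact hlb))]
  | some v =>
      have h1 : lab comp y = v := by
        unfold lab; rw [PySem.Dict.getD_eq_get?_getD, hg]; rfl
      have h2 : lab (relabel comp la lb) y = if v = lb then la else v := by
        unfold lab; rw [PySem.Dict.getD_eq_get?_getD, relabel_get?, hg]; rfl
      rw [h1, h2]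

theorem relabel_labclosed {comp : PySem.Dict String String} {la lb : String}
    (hla : la ∈ comp.keys) (hlc : LabClosed comp) : LabClosed (relabel comp la lb) := by
  intro k v hv
  rw [relabel_get?] at hv
  rw [relabel_keys]
  cases hg : comp.get? k with
  | none => rw [hg] at hv; simp at hv
  | some w =>
      rw [hg] at hv
      simp only [Option.map_some] at hv
      cases hv
      split_ifs
      · exact hla
      · exact hlc k w hg

theorem lab_insert_fresh {comp : PySem.Dict String String} {x : String}
    (hx : comp.contains x = false) (y : String) :
    lab (comp.insert x x) y = lab comp y := by
  unfold lab
  rw [PySem.Dict.getD_insert]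
  split_ifs with h
  · subst h
    have hg : comp.get? y = none := by
      cases hg : comp.get? y with
      | none => rfl
      | some v => rw [PySem.Dict.contains_eq_isSome_get?, hg] at hx; simp at hx
    rw [PySem.Dict.getD_eq_get?_getD, hg]
    rfl
  · rfl

theorem labclosed_insert_fresh {comp : PySem.Dict String String} {x : String}
    (hx : comp.contains x = false) (hlc : LabClosed comp) : LabClosed (comp.insert x x) := by
  intro k v hv
  rw [PySem.Dict.get?_insert] at hv
  rw [PySem.Dict.keys_insert_of_not_contains comp x hx]
  split_ifs at hv with h
  · cases hv; simp
  · exact List.mem_append_left _ (hlc k v hv)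

-- the B-side expressions as they occur in the port
theorem couple_add {p comp : PySem.Dict String String} (hC : Couple p comp)
    (rk : PySem.Dict String Int) (x : String) :
    Couple (ufAdd p rk x).1 (if comp.contains x then comp else comp.insert x x) ∧
    x ∈ (ufAdd p rk x).1.keys ∧
    (∀ y, y ∈ p.keys → y ∈ (ufAdd p rk x).1.keys) ∧
    (∀ y, proot (ufAdd p rk x).1 y = proot p y) ∧
    (∀ y, lab (if comp.contains x then comp else comp.insert x x) y = lab comp y) := by
  obtain ⟨hG, hnd, hlc, hkeys, hE⟩ := hC
  have hcc : p.contains x = comp.contains x := by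
    rw [Bool.eq_iff_iff, PySem.Dict.contains_iff_mem_keys, PySem.Dict.contains_iff_mem_keys]
    exact hkeys x
  obtain ⟨hG', hk', hr'⟩ := ufAdd_spec hG rk x
  by_cases h : p.contains x
  · have hcb : comp.contains x = true := by rw [← hcc]; exact h
    rw [if_pos h] at hk'
    rw [if_pos hcb]
    refine ⟨⟨hG', hnd, hlc, by rw [hk']; exact hkeys, ?_⟩, ?_, ?_, hr', fun y => rfl⟩
    · intro a c
      rw [hr' a, hr' c]; exact hE a c
    · rw [hk']; exact (PySem.Dict.contains_iff_mem_keys p x).1 h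
    · intro y hy; rw [hk']; exact hy
  · rw [Bool.not_eq_true] at h
    have hcb : comp.contains x = false := by rw [← hcc]; exact h
    rw [if_neg (by rw [h]; simp)] at hk'
    rw [if_neg (by rw [hcb]; simp)]
    have hkc : (comp.insert x x).keys = comp.keys ++ [x] :=
      PySem.Dict.keys_insert_of_not_contains comp x hcb
    refine ⟨⟨hG', ?_, labclosed_insert_fresh hcb hlc, ?_, ?_⟩, ?_, ?_, hr', lab_insert_fresh hcb⟩
    · rw [hkc]
      refine List.Nodup.append hnd (List.nodup_singleton x) ?_
      intro a ha hax
      simp at hax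
      rw [hax] at ha
      have : comp.get? x = none := by
        cases hg : comp.get? x with
        | none => rfl
        | some v => rw [PySem.Dict.contains_eq_isSome_get?, hg] at hcb; simp at hcb
      exact ((PySem.Dict.get?_eq_none_iff_not_mem_keys comp x).1 this) ha
    · intro a
      rw [hk', hkc]
      simp only [List.mem_append, List.mem_singleton]
      exact or_congr_left (hkeys a)
    · intro a c
      rw [hr' a, hr' c, lab_insert_fresh hcb, lab_insert_fresh hcb]
      exact hE a c
    · rw [hk']; simp
    · intro y hy; rw [hk']; exact List.mem_append_left _ hy

theorem couple_union {p comp : PySem.Dict String String} (hC : Couple p comp)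
    (rk : PySem.Dict String Int) {a b : String} (ha : a ∈ p.keys) (hb : b ∈ p.keys) :
    Couple (ufUnion p rk a b).1
      (if comp.getD a a ≠ comp.getD b b then relabel comp (comp.getD a a) (comp.getD b b)
       else comp) ∧
    (ufUnion p rk a b).1.keys = p.keys ∧
    (if comp.getD a a ≠ comp.getD b b then relabel comp (comp.getD a a) (comp.getD b b)
       else comp).keys = comp.keys := by
  obtain ⟨hG, hnd, hlc, hkeys, hE⟩ := hC
  obtain ⟨hGu, hku, hEu⟩ := ufUnion_spec hG rk ha hb
  have hamem : a ∈ comp.keys := (hkeys a).1 ha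
  have hbmem : b ∈ comp.keys := (hkeys b).1 hb
  have hla : ∃ va, comp.get? a = some va := by
    cases hg : comp.get? a with
    | none => exact absurd hamem ((PySem.Dict.get?_eq_none_iff_not_mem_keys comp a).1 hg)
    | some v => exact ⟨v, rfl⟩
  have hlb : ∃ vb, comp.get? b = some vb := by
    cases hg : comp.get? b with
    | none => exact absurd hbmem ((PySem.Dict.get?_eq_none_iff_not_mem_keys comp b).1 hg)
    | some v => exact ⟨v, rfl⟩
  obtain ⟨va, hva⟩ := hla
  obtain ⟨vb, hvb⟩ := hlb
  have hlaK : lab comp a ∈ comp.keys := by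
    unfold lab; rw [PySem.Dict.getD_eq_get?_getD, hva]; exact hlc a va hva
  have hlbK : lab comp b ∈ comp.keys := by
    unfold lab; rw [PySem.Dict.getD_eq_get?_getD, hvb]; exact hlc b vb hvb
  have hgdla : comp.getD a a = lab comp a := rfl
  have hgdlb : comp.getD b b = lab comp b := rfl
  by_cases hll : lab comp a = lab comp b
  · rw [if_neg (show ¬(comp.getD a a ≠ comp.getD b b) from fun h => h hll)]
    have hrr : proot p a = proot p b := (hE a b).2 hll
    refine ⟨⟨hGu, hnd, hlc, by rw [hku]; exact hkeys, ?_⟩, hku, rfl⟩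
    intro x y
    rw [hEu x y, ← hE x y]
    constructor
    · rintro (h | ⟨hx, hy⟩)
      · exact h
      · rcases hx with hx | hx <;> rcases hy with hy | hy <;> simp [hx, hy, hrr]
    · exact fun h => Or.inl h
  · rw [if_pos (show comp.getD a a ≠ comp.getD b b from fun h => hll h)]
    have hrr : proot p a ≠ proot p b := fun h => hll ((hE a b).1 h)
    refine ⟨⟨hGu, ?_, relabel_labclosed hlaK hlc, ?_, ?_⟩, hku, relabel_keys comp _ _⟩
    · rw [relabel_keys]; exact hnd
    · intro x
      rw [hku, relabel_keys]; exact hkeys x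
    · intro x y
      rw [hEu x y, hgdla, hgdlb, lab_relabel hlbK x, lab_relabel hlbK y]
      rw [merge_iff (fun h => hll h.symm)]
      rw [show (proot p x = proot p y) ↔ (lab comp x = lab comp y) from hE x y,
          show (proot p x = proot p a) ↔ (lab comp x = lab comp a) from hE x a,
          show (proot p x = proot p b) ↔ (lab comp x = lab comp b) from hE x b,
          show (proot p y = proot p a) ↔ (lab comp y = lab comp a) from hE y a,
          show (proot p y = proot p b) ↔ (lab comp y = lab comp b) from hE y b]
      tauto



-- ==== loop inductions ====
theorem couple_empty : Couple PySem.Dict.empty PySem.Dict.empty := by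
  have hstep : ∀ y, pstep (PySem.Dict.empty : PySem.Dict String String) y = y := by
    intro y; simp [pstep, PySem.Dict.get?_empty]
  have hroot : ∀ y, proot (PySem.Dict.empty : PySem.Dict String String) y = y := by
    intro y
    show piter _ PySem.Dict.empty.size y = y
    have : (PySem.Dict.empty : PySem.Dict String String).size = 0 := rfl
    rw [this]
    rfl
  refine ⟨⟨fun y => ⟨0, hstep y⟩, ?_, by simp [PySem.Dict.keys_empty]⟩,
    by simp [PySem.Dict.keys_empty], ?_, ?_, ?_⟩
  · intro x px h; rw [PySem.Dict.get?_empty] at h; cases h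
  · intro k v h; rw [PySem.Dict.get?_empty] at h; cases h
  · intro x; simp [PySem.Dict.keys_empty]
  · intro x y
    rw [hroot x, hroot y]
    unfold lab
    rw [PySem.Dict.getD_eq_get?_getD, PySem.Dict.getD_eq_get?_getD,
        PySem.Dict.get?_empty, PySem.Dict.get?_empty]
    exact Iff.rfl

theorem pyNormalize_none {v : String} (h : v = "" ∨ v = "NULL" ∨ v = "\\N") :
    pyNormalize v = none := by unfold pyNormalize; rw [if_pos h]

theorem pyNormalize_some {v : String} (h : ¬(v = "" ∨ v = "NULL" ∨ v = "\\N")) :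
    pyNormalize v = some v := by unfold pyNormalize; rw [if_neg h]

theorem couple_inner (un : String) :
    ∀ (l : List (String × String)) (p : PySem.Dict String String)
      (rk : PySem.Dict String Int) (comp : PySem.Dict String String),
      Couple p comp → un ∈ p.keys →
      Couple (l.foldl (ufRowStep un) (p, rk)).1 (l.foldl (compRowStep un) comp) ∧
      un ∈ (l.foldl (ufRowStep un) (p, rk)).1.keys := by
  intro l
  induction l with
  | nil => intro p rk comp hC hun; exact ⟨hC, hun⟩
  | cons fv l ih =>
      intro p rk comp hC hun
      rw [List.foldl_cons, List.foldl_cons]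
      by_cases hskip : fv.2 = "" ∨ fv.2 = "NULL" ∨ fv.2 = "\\N"
      · have hA : ufRowStep un (p, rk) fv = (p, rk) := by
          unfold ufRowStep; rw [pyNormalize_none hskip]
        have hB : compRowStep un comp fv = comp := by
          unfold compRowStep; rw [if_pos hskip]
        rw [hA, hB]
        exact ih p rk comp hC hun
      · have hA : ufRowStep un (p, rk) fv =
            ufUnion (ufAdd p rk (fv.1 ++ ":" ++ fv.2)).1 (ufAdd p rk (fv.1 ++ ":" ++ fv.2)).2
              un (fv.1 ++ ":" ++ fv.2) := by
          unfold ufRowStep; rw [pyNormalize_some hskip]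
        have hB : compRowStep un comp fv =
            (if (if comp.contains (fv.1 ++ ":" ++ fv.2) then comp
                 else comp.insert (fv.1 ++ ":" ++ fv.2) (fv.1 ++ ":" ++ fv.2)).getD un un ≠
                (if comp.contains (fv.1 ++ ":" ++ fv.2) then comp
                 else comp.insert (fv.1 ++ ":" ++ fv.2) (fv.1 ++ ":" ++ fv.2)).getD
                  (fv.1 ++ ":" ++ fv.2) (fv.1 ++ ":" ++ fv.2)
             then relabel (if comp.contains (fv.1 ++ ":" ++ fv.2) then comp
                 else comp.insert (fv.1 ++ ":" ++ fv.2) (fv.1 ++ ":" ++ fv.2))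
                ((if comp.contains (fv.1 ++ ":" ++ fv.2) then comp
                 else comp.insert (fv.1 ++ ":" ++ fv.2) (fv.1 ++ ":" ++ fv.2)).getD un un)
                ((if comp.contains (fv.1 ++ ":" ++ fv.2) then comp
                 else comp.insert (fv.1 ++ ":" ++ fv.2) (fv.1 ++ ":" ++ fv.2)).getD
                  (fv.1 ++ ":" ++ fv.2) (fv.1 ++ ":" ++ fv.2))
             else (if comp.contains (fv.1 ++ ":" ++ fv.2) then comp
                 else comp.insert (fv.1 ++ ":" ++ fv.2) (fv.1 ++ ":" ++ fv.2))) := by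
          unfold compRowStep; rw [if_neg hskip]
        obtain ⟨hC2, hidmem, hkeep, hroots2, hlabs2⟩ :=
          couple_add hC rk (fv.1 ++ ":" ++ fv.2)
        obtain ⟨hC3, hku3, hkc3⟩ :=
          couple_union hC2 (ufAdd p rk (fv.1 ++ ":" ++ fv.2)).2 (hkeep un hun) hidmem
        rw [hA, hB]
        exact ih (ufUnion (ufAdd p rk (fv.1 ++ ":" ++ fv.2)).1
            (ufAdd p rk (fv.1 ++ ":" ++ fv.2)).2 un (fv.1 ++ ":" ++ fv.2)).1
          (ufUnion (ufAdd p rk (fv.1 ++ ":" ++ fv.2)).1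
            (ufAdd p rk (fv.1 ++ ":" ++ fv.2)).2 un (fv.1 ++ ":" ++ fv.2)).2
          _ hC3 (by rw [hku3]; exact hkeep un hun)

theorem couple_rows :
    ∀ (rows : List (List String))
      (stA : (PySem.Dict String String × PySem.Dict String Int) × List (String × String))
      (stB : PySem.Dict String String × List (String × String)),
      Couple stA.1.1 stB.1 → stA.2 = stB.2 →
      Couple (rows.foldl rowStepA stA).1.1 (rows.foldl rowStepB stB).1 ∧
      (rows.foldl rowStepA stA).2 = (rows.foldl rowStepB stB).2 := by
  intro rows
  induction rows with
  | nil => intro stA stB hC huns; exact ⟨hC, huns⟩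
  | cons row rows ih =>
      intro stA stB hC huns
      rw [List.foldl_cons, List.foldl_cons]
      have hA : rowStepA stA row =
          ((IDENTITY_FIELDS.zip (row.drop 1)).foldl
              (ufRowStep ("user:" ++ row.headD ""))
              (ufAdd stA.1.1 stA.1.2 ("user:" ++ row.headD "")),
            stA.2 ++ [("user:" ++ row.headD "", row.headD "")]) := rfl
      have hB : rowStepB stB row =
          ((IDENTITY_FIELDS.zip (row.drop 1)).foldl
              (compRowStep ("user:" ++ row.headD ""))
              (if stB.1.contains ("user:" ++ row.headD "") then stB.1
               else stB.1.insert ("user:" ++ row.headD "") ("user:" ++ row.headD "")),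
            stB.2 ++ [("user:" ++ row.headD "", row.headD "")]) := rfl
      obtain ⟨hC2, humem, hkeep, hroots2, hlabs2⟩ :=
        couple_add hC stA.1.2 ("user:" ++ row.headD "")
      obtain ⟨hC3, hun3⟩ := couple_inner ("user:" ++ row.headD "") _
        (ufAdd stA.1.1 stA.1.2 ("user:" ++ row.headD "")).1
        (ufAdd stA.1.1 stA.1.2 ("user:" ++ row.headD "")).2 _ hC2 humem
      rw [hA, hB]
      exact ih _ _ hC3 (by rw [huns])


-- ==== phase 2: threading find through root_to_users ====
theorem phase2A :
    ∀ (uns : List (String × String)) (p : PySem.Dict String String)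
      (g : PySem.Dict String (List String)) (R : String → String),
      GoodP p → (∀ y, proot p y = R y) →
      (uns.foldl (fun (gp : PySem.Dict String (List String) × PySem.Dict String String) un =>
          (gp.1.insert (ufFind (gp.2.size + 1) gp.2 un.1).1
             (gp.1.getD (ufFind (gp.2.size + 1) gp.2 un.1).1 [] ++ [un.2]),
           (ufFind (gp.2.size + 1) gp.2 un.1).2)) (g, p)).1
        = uns.foldl (fun g (un : String × String) =>
            g.insert (R un.1) (g.getD (R un.1) [] ++ [un.2])) g := by
  intro uns
  induction uns with
  | nil => intro p g R hG hR; rfl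
  | cons un uns ih =>
      intro p g R hG hR
      rw [List.foldl_cons, List.foldl_cons]
      obtain ⟨h1, _, h3, h4⟩ := ufFind_run hG un.1 (p.size + 1) (by omega)
      have hkey : (ufFind (p.size + 1) p un.1).1 = R un.1 := by rw [h1, hR]
      rw [hkey]
      exact ih (ufFind (p.size + 1) p un.1).2 _ R h3 (fun y => by rw [h4, hR])

-- ==== pairing: two grouping folds with equivalent key functions ====
def PairItems (f g : String → String) :
    List (String × List String) → List (String × List String) → Prop :=
  List.Forall₂ (fun pa pb => pa.2 = pb.2 ∧ ∃ w, pa.1 = f w ∧ pb.1 = g w)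

theorem pair_find? {f g : String → String} (H : ∀ a b, f a = f b ↔ g a = g b) :
    ∀ {la lb : List (String × List String)}, PairItems f g la lb → ∀ w,
      Option.map Prod.snd (la.find? (fun q => q.1 == f w))
        = Option.map Prod.snd (lb.find? (fun q => q.1 == g w)) := by
  intro la lb hp
  induction hp with
  | nil => intro w; rfl
  | @cons pa pb la lb hhead _ ih =>
      intro w
      obtain ⟨hv, w', hfa, hgb⟩ := hhead
      have hbeq : (pa.1 == f w) = (pb.1 == g w) := by
        rw [hfa, hgb]
        by_cases h : f w' = f w
        · simp [h, (H w' w).1 h]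
        · have h2 : ¬ g w' = g w := fun hg => h ((H w' w).2 hg)
          simp [h, h2]
      rw [List.find?_cons, List.find?_cons, hbeq]
      cases hb : (pb.1 == g w) with
      | true => simp [hv]
      | false => exact ih w

theorem pair_get? {f g : String → String} (H : ∀ a b, f a = f b ↔ g a = g b)
    {dA dB : PySem.Dict String (List String)} (hp : PairItems f g dA.items dB.items)
    (w : String) : dA.get? (f w) = dB.get? (g w) :=
  pair_find? H hp w

theorem pair_insert {f g : String → String} (H : ∀ a b, f a = f b ↔ g a = g b)
    {dA dB : PySem.Dict String (List String)} (hp : PairItems f g dA.items dB.items)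
    (u : String) (v : List String) :
    PairItems f g ((dA.insert (f u) v).items) ((dB.insert (g u) v).items) := by
  have hc : dA.contains (f u) = dB.contains (g u) := by
    rw [PySem.Dict.contains_eq_isSome_get?, PySem.Dict.contains_eq_isSome_get?,
        pair_get? H hp u]
  cases hcc : dB.contains (g u) with
  | true =>
      rw [PySem.Dict.items_insert_of_contains _ _ (by rw [hc]; exact hcc),
          PySem.Dict.items_insert_of_contains _ _ hcc]
      have hgen : ∀ {la lb : List (String × List String)},
          List.Forall₂ (fun pa pb => pa.2 = pb.2 ∧ ∃ w, pa.1 = f w ∧ pb.1 = g w) la lb →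
          List.Forall₂ (fun pa pb => pa.2 = pb.2 ∧ ∃ w, pa.1 = f w ∧ pb.1 = g w)
            (la.map (fun p => if p.1 == f u then (f u, v) else p))
            (lb.map (fun p => if p.1 == g u then (g u, v) else p)) := by
        intro la lb h
        induction h with
        | nil => exact List.Forall₂.nil
        | @cons pa pb la' lb' hhead _ ih =>
            obtain ⟨hv, w', hfa, hgb⟩ := hhead
            have hbeq : (pa.1 == f u) = (pb.1 == g u) := by
              rw [hfa, hgb]
              by_cases h : f w' = f u
              · simp [h, (H w' u).1 h]
              · have h2 : ¬ g w' = g u := fun hg => h ((H w' u).2 hg)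
                simp [h, h2]
            rw [List.map_cons, List.map_cons]
            refine List.Forall₂.cons ?_ ih
            rw [hbeq]
            cases hb : (pb.1 == g u) with
            | true => exact ⟨rfl, u, rfl, rfl⟩
            | false => exact ⟨hv, w', hfa, hgb⟩
      exact hgen hp
  | false =>
      rw [PySem.Dict.items_insert_of_not_contains _ _ (by rw [hc]; exact hcc),
          PySem.Dict.items_insert_of_not_contains _ _ hcc]
      have hgen : ∀ {la lb : List (String × List String)},
          List.Forall₂ (fun pa pb => pa.2 = pb.2 ∧ ∃ w, pa.1 = f w ∧ pb.1 = g w) la lb →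
          List.Forall₂ (fun pa pb => pa.2 = pb.2 ∧ ∃ w, pa.1 = f w ∧ pb.1 = g w)
            (la ++ [(f u, v)]) (lb ++ [(g u, v)]) := by
        intro la lb h
        induction h with
        | nil => exact List.Forall₂.cons ⟨rfl, u, rfl, rfl⟩ List.Forall₂.nil
        | cons hhead _ ih => exact List.Forall₂.cons hhead ih
      exact hgen hp

theorem pair_fold {f g : String → String} (H : ∀ a b, f a = f b ↔ g a = g b) :
    ∀ (uns : List (String × String)) (dA dB : PySem.Dict String (List String)),
      PairItems f g dA.items dB.items →
      PairItems f g
        ((uns.foldl (fun d (un : String × String) =>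
            d.insert (f un.1) (d.getD (f un.1) [] ++ [un.2])) dA).items)
        ((uns.foldl (fun d (un : String × String) =>
            d.insert (g un.1) (d.getD (g un.1) [] ++ [un.2])) dB).items) := by
  intro uns
  induction uns with
  | nil => intro dA dB hp; exact hp
  | cons un uns ih =>
      intro dA dB hp
      rw [List.foldl_cons, List.foldl_cons]
      have hgd : dA.getD (f un.1) [] = dB.getD (g un.1) [] := by
        rw [PySem.Dict.getD_eq_get?_getD, PySem.Dict.getD_eq_get?_getD,
            pair_get? H hp un.1]
      rw [hgd]
      exact ih _ _ (pair_insert H hp un.1 _)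

theorem pair_values {f g : String → String}
    {dA dB : PySem.Dict String (List String)} (hp : PairItems f g dA.items dB.items) :
    dA.values = dB.values := by
  have hgen : ∀ {la lb : List (String × List String)}, List.Forall₂
      (fun pa pb => pa.2 = pb.2 ∧ ∃ w, pa.1 = f w ∧ pb.1 = g w) la lb →
      la.map Prod.snd = lb.map Prod.snd := by
    intro la lb h
    induction h with
    | nil => rfl
    | cons hhead _ ih => rw [List.map_cons, List.map_cons, hhead.1, ih]
  show dA.items.map Prod.snd = dB.items.map Prod.snd
  exact hgen hp

-- ==== phase 3: emission tails ====
theorem oneid_eq : oneidA = oneidB := rfl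

theorem enumerate_cons (grp : List String) (gs : List (List String)) (n : Int) :
    PySem.List.enumerate (grp :: gs) n = (n, grp) :: PySem.List.enumerate gs (n + 1) := rfl

theorem tail_eq :
    ∀ (gs : List (List String)) (n : Int) (acc : List (String × String)),
      (gs.foldl (fun (st : Int × List (String × String)) users =>
          (st.1 + 1, users.foldl (fun res u => res ++ [(oneidA st.1, u)]) st.2))
        (n, acc)).2
        = acc ++ (PySem.List.enumerate gs n).flatMap
            (fun gi => gi.2.map (fun u => (oneidB gi.1, u))) := by
  intro gs
  induction gs with
  | nil => intro n acc; simp [PySem.List.enumerate]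
  | cons grp gs ih =>
      intro n acc
      rw [List.foldl_cons, enumerate_cons, List.flatMap_cons]
      show (List.foldl _ (n + 1,
          grp.foldl (fun res u => res ++ [(oneidA n, u)]) acc) gs).2 = _
      rw [PySem.List.foldl_append_singleton_eq_map (fun u => (oneidA n, u)) grp acc]
      rw [ih (n + 1) (acc ++ grp.map (fun u => (oneidA n, u)))]
      simp [oneid_eq]

-- ==== final assembly ====
theorem getD_self_eq_lab (comp : PySem.Dict String String) (x : String) :
    comp.getD x x = lab comp x := rfl

theorem tail_eq_one (gs : List (List String)) :
    (gs.foldl (fun (st : Int × List (String × String)) users =>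
        (st.1 + 1, users.foldl (fun res u => res ++ [(oneidA st.1, u)]) st.2))
      ((1 : Int), [])).2
      = (PySem.List.enumerate gs 1).flatMap
          (fun gi => gi.2.map (fun u => (oneidB gi.1, u))) := by
  have h := tail_eq gs 1 []
  exact h

theorem AB_eq (rows : List (List String)) :
    build_oneid_mapping rows = build_oneid_mapping_alt rows := by
  obtain ⟨hC, huns⟩ := couple_rows rows ((PySem.Dict.empty, PySem.Dict.empty), [])
    (PySem.Dict.empty, []) couple_empty rfl
  obtain ⟨hG, _, _, _, hE⟩ := hC
  simp only [build_oneid_mapping, build_oneid_mapping_alt, PySem.Dict.modify]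
  rw [phase2A _ _ _ (proot (rows.foldl rowStepA ((PySem.Dict.empty, PySem.Dict.empty), [])).1.1)
      hG (fun y => rfl)]
  rw [huns]
  simp only [getD_self_eq_lab]
  have hval := pair_values
    (pair_fold (f := proot (rows.foldl rowStepA ((PySem.Dict.empty, PySem.Dict.empty), [])).1.1)
      (g := lab (rows.foldl rowStepB (PySem.Dict.empty, [])).1) hE
      (rows.foldl rowStepB (PySem.Dict.empty, [])).2 PySem.Dict.empty PySem.Dict.empty
      List.Forall₂.nil)
  rw [hval]
  rw [tail_eq_one]

-- ===== VERDICT (by name: the statement is the Claim_ definition above) =====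
theorem build_oneid_mapping_spec : Claim_equal_build_oneid_mapping := by
  intro rows _ _
  unfold Spec_build_oneid_mapping
  exact AB_eq rows
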